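-- pv_equiv track=rewrite | github.com/adiseal/edabit-practices | Three Lists.py | sum_common
-- ===== SOURCE A (Python) =====
-- from collections import Counter
--
-- def sum_common(lst1, lst2, lst3):
--     counter1 = Counter(lst1)
--     counter2 = Counter(lst2)
--     counter3 = Counter(lst3)
--
--     common_elements = counter1.keys() & counter2.keys() & counter3.keys()
--
--     common_sum = 0
--     for element in common_elements:
--         min_count = min(counter1[element], counter2[element], counter3[element])
--         common_sum += element * min_count
--
--     return common_sum
-- ===== SOURCE B (Python) =====
-- def sum_common(lst1, lst2, lst3):
--     # Multiset intersection by consumption: walk lst1 once, and each time the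
--     # element is still available in both remaining pools, add it and consume
--     # one occurrence from each pool. No frequency tables, no counting.
--     rest2 = list(lst2)
--     rest3 = list(lst3)
--     total = 0
--     for x in lst1:
--         if x in rest2 and x in rest3:
--             total += x
--             rest2.remove(x)
--             rest3.remove(x)
--     return total
-- ===== Notes on version B (the rewrite author's own statement) =====
-- stated objective: alternative
-- what changed: B never counts anything: instead of building three Counters and intersecting key sets, it walks lst1 once and greedily consumes matching occurrences from mutable copies of lst2 and lst3, adding each element it manages to match; each element ends up added exactly min(c1,c2,c3) times.
import Mathlib
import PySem

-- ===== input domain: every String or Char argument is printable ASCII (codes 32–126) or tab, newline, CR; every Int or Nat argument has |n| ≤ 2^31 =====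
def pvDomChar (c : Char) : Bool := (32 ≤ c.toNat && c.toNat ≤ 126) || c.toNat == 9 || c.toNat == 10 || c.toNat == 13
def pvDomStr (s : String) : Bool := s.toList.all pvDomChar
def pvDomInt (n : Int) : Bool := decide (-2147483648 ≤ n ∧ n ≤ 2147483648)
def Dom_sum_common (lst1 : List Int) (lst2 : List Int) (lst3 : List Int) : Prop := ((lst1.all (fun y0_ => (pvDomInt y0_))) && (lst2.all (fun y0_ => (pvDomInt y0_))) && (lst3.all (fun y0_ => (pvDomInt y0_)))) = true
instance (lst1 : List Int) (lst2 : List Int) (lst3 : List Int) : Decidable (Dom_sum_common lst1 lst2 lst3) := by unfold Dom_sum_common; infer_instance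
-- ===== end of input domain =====

-- B replaces counting-and-intersecting by a greedy multiset intersection: it walks lst1
-- once, consuming one matching occurrence from copies of lst2 and lst3 per hit (alternative).

-- ===== PORT A =====
def sum_common (lst1 : List Int) (lst2 : List Int) (lst3 : List Int) : Int :=
  let counter1 := PySem.Dict.counter lst1
  let counter2 := PySem.Dict.counter lst2
  let counter3 := PySem.Dict.counter lst3
  let common_elements :=
    PySem.Set.inter (PySem.Set.inter counter1.keys counter2.keys) counter3.keys
  -- Python iterates the set in hash order; the sum is order-independent, folded in s's order
  common_elements.foldl
    (fun common_sum element =>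
      let min_count :=
        min (min (counter1.getD element 0) (counter2.getD element 0)) (counter3.getD element 0)
      common_sum + element * min_count) 0

-- ===== PORT B =====
-- Python's list.remove(x) removes the FIRST occurrence = List.erase (exact here since
-- membership is checked first, so no ValueError is reachable).
def sum_common_alt (lst1 : List Int) (lst2 : List Int) (lst3 : List Int) : Int :=
  (lst1.foldl
    (fun (st : Int × List Int × List Int) x =>
      if x ∈ st.2.1 ∧ x ∈ st.2.2 then (st.1 + x, st.2.1.erase x, st.2.2.erase x)
      else st)
    (0, lst2, lst3)).1

-- ===== PRECONDITION & SPEC =====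
def Spec_sum_common (lst1 : List Int) (lst2 : List Int) (lst3 : List Int) (out : Int) : Prop := out = sum_common_alt lst1 lst2 lst3
instance (lst1 : List Int) (lst2 : List Int) (lst3 : List Int) (out : Int) : Decidable (Spec_sum_common lst1 lst2 lst3 out) := by unfold Spec_sum_common; infer_instance

-- ===== CLAIM (what is proved, stated in full; the proofs are below) =====
def Claim_equal_sum_common : Prop := ∀ (lst1 : List Int) (lst2 : List Int) (lst3 : List Int), Dom_sum_common lst1 lst2 lst3 → Spec_sum_common lst1 lst2 lst3 (sum_common lst1 lst2 lst3)

-- ===== LEMMAS AND PROOFS =====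

-- The common value both programs compute: ∑ e, e * min of the three multiplicities.
def commonSum (s : Finset Int) (l1 l2 l3 : List Int) : Int :=
  ∑ e ∈ s, e * ((min (min (l1.count e) (l2.count e)) (l3.count e) : Nat) : Int)

theorem inter_eq_filter (s t : List Int) :
    PySem.Set.inter s t = s.filter (fun x => PySem.Set.contains t x) := rfl

-- B's fold computes t + commonSum over any finset containing lst1's elements.
theorem alt_go (l1 : List Int) : ∀ (l2 l3 : List Int) (t : Int) (s : Finset Int),
    l1.toFinset ⊆ s →
    (l1.foldl
      (fun (st : Int × List Int × List Int) x =>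
        if x ∈ st.2.1 ∧ x ∈ st.2.2 then (st.1 + x, st.2.1.erase x, st.2.2.erase x)
        else st)
      (t, l2, l3)).1 = t + commonSum s l1 l2 l3 := by
  induction l1 with
  | nil =>
    intro l2 l3 t s _
    simp [commonSum]
  | cons x xs ih =>
    intro l2 l3 t s hsub
    have hxs : xs.toFinset ⊆ s := fun e he => hsub (by simp [List.mem_toFinset] at he ⊢; exact Or.inr he)
    have hx : x ∈ s := hsub (by simp)
    simp only [List.foldl_cons]
    by_cases h : x ∈ l2 ∧ x ∈ l3
    · rw [if_pos h]
      rw [ih (l2.erase x) (l3.erase x) (t + x) s hxs]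
      have key : commonSum s (x :: xs) l2 l3 = x + commonSum s xs (l2.erase x) (l3.erase x) := by
        unfold commonSum
        rw [← Finset.add_sum_erase s _ hx, ← Finset.add_sum_erase s _ hx]
        have hterms : ∀ e ∈ s.erase x,
            e * ((min (min ((x :: xs).count e) (l2.count e)) (l3.count e) : Nat) : Int)
            = e * ((min (min (xs.count e) ((l2.erase x).count e)) ((l3.erase x).count e) : Nat) : Int) := by
          intro e he
          have hne : e ≠ x := Finset.ne_of_mem_erase he
          rw [List.count_cons_of_ne (Ne.symm hne), List.count_erase_of_ne hne, List.count_erase_of_ne hne]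
        rw [Finset.sum_congr rfl hterms]
        have h2 : l2.count x = (l2.erase x).count x + 1 := by
          rw [List.count_erase_self]
          have := List.count_pos_iff.mpr h.1
          omega
        have h3 : l3.count x = (l3.erase x).count x + 1 := by
          rw [List.count_erase_self]
          have := List.count_pos_iff.mpr h.2
          omega
        have hmin : (min (min ((x :: xs).count x) (l2.count x)) (l3.count x) : Nat)
            = min (min (xs.count x) ((l2.erase x).count x)) ((l3.erase x).count x) + 1 := by
          rw [List.count_cons_self, h2, h3]; omega
        rw [hmin]
        push_cast
        ring
      rw [key]; ring
    · rw [if_neg h]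
      rw [ih l2 l3 t s hxs]
      have key : commonSum s (x :: xs) l2 l3 = commonSum s xs l2 l3 := by
        unfold commonSum
        apply Finset.sum_congr rfl
        intro e _
        by_cases hex : e = x
        · subst hex
          have : l2.count e = 0 ∨ l3.count e = 0 := by
            rcases not_and_or.mp h with h' | h'
            · exact Or.inl (List.count_eq_zero.mpr h')
            · exact Or.inr (List.count_eq_zero.mpr h')
          rcases this with h' | h' <;> rw [h'] <;> simp
        · rw [List.count_cons_of_ne (Ne.symm hex)]
      rw [key]

-- A's fold computes commonSum over lst1.toFinset.
theorem a_eq (l1 l2 l3 : List Int) :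
    sum_common l1 l2 l3 = commonSum l1.toFinset l1 l2 l3 := by
  unfold sum_common
  simp only [PySem.Dict.keys_counter, inter_eq_filter, List.filter_filter]
  have hfold : ∀ (L : List Int) (t : Int),
      L.foldl (fun acc e => acc + e * (min (min ((PySem.Dict.counter l1).getD e 0)
        ((PySem.Dict.counter l2).getD e 0)) ((PySem.Dict.counter l3).getD e 0))) t
      = t + (L.map (fun e => e * (min (min ((l1.count e : Int)) ((l2.count e : Int))) ((l3.count e : Int))))).sum := by
    intro L
    induction L with
    | nil => intro t; simp
    | cons y ys ih =>
      intro t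
      rw [List.foldl_cons, ih]
      simp only [List.map_cons, List.sum_cons, PySem.Dict.getD_counter]
      ring
  rw [hfold]
  have hnd : (List.filter (fun x => ((PySem.Set.ofList l3).contains x && (PySem.Set.ofList l2).contains x)) (PySem.Set.ofList l1)).Nodup :=
    (PySem.Set.nodup_ofList l1).filter _
  rw [← List.sum_toFinset _ hnd]
  rw [List.toFinset_filter]
  have htf : (PySem.Set.ofList l1).toFinset = l1.toFinset := by
    apply Finset.ext; intro e
    simp [List.mem_toFinset, PySem.Set.mem_ofList]
  rw [htf]
  unfold commonSum
  rw [Finset.sum_filter, zero_add]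
  apply Finset.sum_congr rfl
  intro e _
  by_cases hp : ((PySem.Set.ofList l3).contains e && (PySem.Set.ofList l2).contains e) = true
  · rw [if_pos hp]
    push_cast
    ring
  · rw [if_neg hp]
    have : l2.count e = 0 ∨ l3.count e = 0 := by
      rcases Bool.and_eq_false_iff.mp (Bool.not_eq_true _ |>.mp hp) with h' | h'
      · refine Or.inr (List.count_eq_zero.mpr ?_)
        intro hm
        have hc := (PySem.Set.contains_iff _ _).mpr ((PySem.Set.mem_ofList _ _).mpr hm)
        rw [h'] at hc
        exact Bool.false_ne_true hc
      · refine Or.inl (List.count_eq_zero.mpr ?_)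
        intro hm
        have hc := (PySem.Set.contains_iff _ _).mpr ((PySem.Set.mem_ofList _ _).mpr hm)
        rw [h'] at hc
        exact Bool.false_ne_true hc
    rcases this with h' | h' <;> rw [h'] <;> simp

-- ===== VERDICT (by name: the statement is the Claim_ definition above) =====
theorem sum_common_spec : Claim_equal_sum_common := by
  intro l1 l2 l3 _
  unfold Spec_sum_common sum_common_alt
  rw [alt_go l1 l2 l3 0 l1.toFinset (Finset.Subset.refl _), a_eq, zero_add]
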